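-- pv_equiv track=rewrite | github.com/Mamun5011/Loss-Landscape-Poisoning | LLP-Data/OPT_gradient_matching_latest_MultipleSample.py | build_neighbor_continuations
-- ===== SOURCE A (Python) =====
-- def build_neighbor_continuations(
--     target_secret: str,
--     keep: int = 100,
--     start: int = 100000000,
--     end: int = 199999999,
-- ):
--     continuations = []
--     k = 0
--
--     for i in range(start, end):
--         continuation = " " + str(i) + "."
--
--         if continuation == target_secret:
--             continue
--
--         if i % 2 == 0:
--             continuations.append(continuation)
--             k += 1
--
--         if k >= keep:
--             break
--
--     return continuations
-- ===== SOURCE B (Python) =====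
-- def build_neighbor_continuations(
--     target_secret: str,
--     keep: int = 100,
--     start: int = 100000000,
--     end: int = 199999999,
-- ):
--     # Countdown while-loop over only the even numbers: no parity test, no break.
--     out = []
--     i = start + start % 2
--     remaining = keep
--     while remaining > 0 and i < end:
--         c = " " + str(i) + "."
--         if c != target_secret:
--             out.append(c)
--             remaining -= 1
--         i += 2
--     return out
-- ===== Notes on version B (the rewrite author's own statement) =====
-- stated objective: simpler
-- what changed: B replaces A's for-loop over every integer (with a parity test, an upward counter and a break) by a countdown while-loop stepping by 2 from the first even number >= start, decrementing a remaining budget; the keep test guards the loop header instead of running after appending.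
-- intended difference: When keep <= 0 and the first non-target continuation at or after start is even (and inside the range), A still returns that one continuation because its break test only runs after appending, while B returns the intended empty list for a non-positive keep. — e.g. on build_neighbor_continuations("x", 0, 2, 5): A returns [" 2."], B returns []
import Mathlib
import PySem

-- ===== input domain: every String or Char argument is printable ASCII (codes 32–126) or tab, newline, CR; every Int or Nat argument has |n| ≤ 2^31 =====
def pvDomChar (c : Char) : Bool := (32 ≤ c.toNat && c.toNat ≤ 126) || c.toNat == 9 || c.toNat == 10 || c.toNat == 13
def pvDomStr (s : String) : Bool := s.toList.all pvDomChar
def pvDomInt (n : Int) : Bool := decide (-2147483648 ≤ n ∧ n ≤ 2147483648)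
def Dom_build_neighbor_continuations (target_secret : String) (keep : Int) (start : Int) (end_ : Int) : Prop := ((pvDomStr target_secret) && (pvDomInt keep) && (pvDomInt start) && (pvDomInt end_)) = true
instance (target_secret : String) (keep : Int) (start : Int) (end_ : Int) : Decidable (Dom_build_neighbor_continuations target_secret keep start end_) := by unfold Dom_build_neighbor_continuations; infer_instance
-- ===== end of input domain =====

-- B replaces A's for-loop-with-parity-test-and-break by a countdown while-loop over the even
-- numbers only; for keep <= 0 B returns [] where A may return one element (stated difference D_).

-- ===== PORT A =====
-- loop state: accumulated continuations and the counter k; early 'break' = returning the accumulator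
def bncLoopA (target : String) (keep : Int) : List Int → List String → Int → List String
  | [], acc, _ => acc
  | i :: rest, acc, k =>
    let continuation := " " ++ PySem.Int.toStr i ++ "."
    if continuation = target then bncLoopA target keep rest acc k
    else
      let p : List String × Int :=
        if PySem.Int.mod i 2 = 0 then (acc ++ [continuation], k + 1) else (acc, k)
      if p.2 ≥ keep then p.1 else bncLoopA target keep rest p.1 p.2

def build_neighbor_continuations (target_secret : String) (keep : Int) (start : Int) (end_ : Int) : List String :=
  bncLoopA target_secret keep (PySem.List.pyRange start end_ 1) [] 0

-- ===== PORT B =====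
-- the while loop: state (i, remaining, out); terminates because end_ - i shrinks by 2 each turn
def bncGo (target : String) (end_ : Int) (i remaining : Int) (out : List String) : List String :=
  if h : 0 < remaining ∧ i < end_ then
    let c := " " ++ PySem.Int.toStr i ++ "."
    if c ≠ target then bncGo target end_ (i + 2) (remaining - 1) (out ++ [c])
    else bncGo target end_ (i + 2) remaining out
  else out
termination_by (end_ - i).toNat
decreasing_by all_goals omega

def build_neighbor_continuations_alt (target_secret : String) (keep : Int) (start : Int) (end_ : Int) : List String :=
  bncGo target_secret end_ (start + PySem.Int.mod start 2) keep []

-- ===== PRECONDITION & SPEC =====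
-- When keep <= 0 and the first even continuation in range is not the target, A still returns that one
-- continuation (its break test runs only after appending), while B returns the intended empty list.
def D_build_neighbor_continuations (target_secret : String) (keep : Int) (start : Int) (end_ : Int) : Prop :=
  keep ≤ 0 ∧ start < end_ ∧
    if " " ++ PySem.Int.toStr start ++ "." = target_secret
    then PySem.Int.mod start 2 = 1 ∧ start + 1 < end_
    else PySem.Int.mod start 2 = 0
instance (target_secret : String) (keep : Int) (start : Int) (end_ : Int) : Decidable (D_build_neighbor_continuations target_secret keep start end_) := by unfold D_build_neighbor_continuations; infer_instance

def Spec_build_neighbor_continuations (target_secret : String) (keep : Int) (start : Int) (end_ : Int) (out : List String) : Prop := ¬ D_build_neighbor_continuations target_secret keep start end_ → out = build_neighbor_continuations_alt target_secret keep start end_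
instance (target_secret : String) (keep : Int) (start : Int) (end_ : Int) (out : List String) : Decidable (Spec_build_neighbor_continuations target_secret keep start end_ out) := by unfold Spec_build_neighbor_continuations; infer_instance

def pvDiffWitness_build_neighbor_continuations : String × Int × Int × Int := ("x", 0, 2, 5)
def pvDiffWitnessOut_build_neighbor_continuations : (List String) × (List String) := ([" 2."], [])

-- ===== CLAIM (what is proved, stated in full; the proofs are below) =====
def Claim_unchanged_build_neighbor_continuations : Prop := ∀ (target_secret : String) (keep : Int) (start : Int) (end_ : Int), Dom_build_neighbor_continuations target_secret keep start end_ → Spec_build_neighbor_continuations target_secret keep start end_ (build_neighbor_continuations target_secret keep start end_)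
def Claim_changed_build_neighbor_continuations : Prop := Dom_build_neighbor_continuations (pvDiffWitness_build_neighbor_continuations.1) (pvDiffWitness_build_neighbor_continuations.2.1) (pvDiffWitness_build_neighbor_continuations.2.2.1) (pvDiffWitness_build_neighbor_continuations.2.2.2) ∧ D_build_neighbor_continuations (pvDiffWitness_build_neighbor_continuations.1) (pvDiffWitness_build_neighbor_continuations.2.1) (pvDiffWitness_build_neighbor_continuations.2.2.1) (pvDiffWitness_build_neighbor_continuations.2.2.2) ∧ build_neighbor_continuations (pvDiffWitness_build_neighbor_continuations.1) (pvDiffWitness_build_neighbor_continuations.2.1) (pvDiffWitness_build_neighbor_continuations.2.2.1) (pvDiffWitness_build_neighbor_continuations.2.2.2) = pvDiffWitnessOut_build_neighbor_continuations.1 ∧ build_neighbor_continuations_alt (pvDiffWitness_build_neighbor_continuations.1) (pvDiffWitness_build_neighbor_continuations.2.1) (pvDiffWitness_build_neighbor_continuations.2.2.1) (pvDiffWitness_build_neighbor_continuations.2.2.2) = pvDiffWitnessOut_build_neighbor_continuations.2 ∧ pvDiffWitnessOut_build_neighbor_continuations.1 ≠ pvDiffWitnessOut_build_neighbor_continuat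ions.2
def Claim_exact_build_neighbor_continuations : Prop := ∀ (target_secret : String) (keep : Int) (start : Int) (end_ : Int), Dom_build_neighbor_continuations target_secret keep start end_ → D_build_neighbor_continuations target_secret keep start end_ → build_neighbor_continuations target_secret keep start end_ ≠ build_neighbor_continuations_alt target_secret keep start end_

-- ===== LEMMAS AND PROOFS =====

-- toDigitsCore accumulates onto its last argument
lemma pvTdcAppend : ∀ (f n : Nat) (l : List Char),
    Nat.toDigitsCore 10 f n l = Nat.toDigitsCore 10 f n [] ++ l := by
  intro f
  induction f with
  | zero => intro n l; simp [Nat.toDigitsCore]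
  | succ f ih =>
    intro n l
    simp only [Nat.toDigitsCore]
    by_cases h : n / 10 = 0
    · simp [h]
    · simp only [h, if_false]
      rw [ih (n / 10) [Nat.digitChar (n % 10)], ih (n / 10) (Nat.digitChar (n % 10) :: l)]
      simp

lemma pvToDigitsLast (n : Nat) :
    (Nat.toDigits 10 n).getLast? = some (Nat.digitChar (n % 10)) := by
  show (Nat.toDigitsCore 10 (n + 1) n []).getLast? = _
  simp only [Nat.toDigitsCore]
  by_cases h : n / 10 = 0
  · simp [h]
  · simp only [h, if_false]
    rw [pvTdcAppend]
    simp

lemma pvDigitCharInj : ∀ a, a < 10 → ∀ b, b < 10 → Nat.digitChar a = Nat.digitChar b → a = b := by decide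

lemma pvToDigitsSuccNe (k : Nat) : Nat.toDigits 10 k ≠ Nat.toDigits 10 (k + 1) := by
  intro h
  have h1 := pvToDigitsLast k
  have h2 := pvToDigitsLast (k + 1)
  rw [h, h2] at h1
  have := pvDigitCharInj ((k+1) % 10) (by omega) (k % 10) (by omega) (by injection h1)
  omega

lemma pvToCharsSuccNe (m : Int) : PySem.Int.toChars m ≠ PySem.Int.toChars (m + 1) := by
  by_cases hm1 : m = -1
  · subst hm1; decide
  unfold PySem.Int.toChars
  rcases lt_trichotomy m (-1) with h | h | h
  · have hneg : m < 0 := by omega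
    have hneg1 : m + 1 < 0 := by omega
    simp only [hneg, hneg1, if_true]
    intro hEq
    have : Nat.toDigits 10 m.natAbs = Nat.toDigits 10 (m + 1).natAbs := by
      injection hEq
    have habs : m.natAbs = (m + 1).natAbs + 1 := by omega
    rw [habs] at this
    exact pvToDigitsSuccNe (m + 1).natAbs this.symm
  · omega
  · have h0 : ¬ m < 0 := by omega
    have h1 : ¬ m + 1 < 0 := by omega
    simp only [h0, h1, if_false]
    have ht : (m + 1).toNat = m.toNat + 1 := by omega
    rw [ht]
    exact pvToDigitsSuccNe m.toNat

-- consecutive integers never print the same continuation string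
lemma pvContSuccNe (m : Int) :
    (" " ++ PySem.Int.toStr m ++ "." : String) ≠ " " ++ PySem.Int.toStr (m + 1) ++ "." := by
  intro h
  apply pvToCharsSuccNe m
  have := congrArg String.toList h
  simp only [String.toList_append] at this
  have h2 : PySem.Int.toChars m ++ ['.'] = PySem.Int.toChars (m + 1) ++ ['.'] := by
    simpa using this
  exact List.append_cancel_right h2

-- an exhausted budget or range stops the while loop at once
lemma pvGoDone (t : String) (end_ i remaining : Int) (out : List String)
    (h : ¬ (0 < remaining ∧ i < end_)) : bncGo t end_ i remaining out = out := by
  rw [bncGo]; rw [dif_neg h]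

-- main induction, keep ≥ 1: A from start with counter = |acc| equals B's while loop with
-- budget keep - |acc| from the first even number ≥ start
lemma pvMain (t : String) (keep : Int) :
    ∀ (start end_ : Int) (acc : List String), ((acc.length : Int) < keep) →
      bncLoopA t keep (PySem.List.pyRange start end_ 1) acc (acc.length)
        = bncGo t end_ (start + PySem.Int.mod start 2) (keep - acc.length) acc := by
  intro start end_
  generalize hm : (end_ - start).toNat = m
  induction m using Nat.strong_induction_on generalizing start with
  | _ m ih =>
  intro acc hacc
  have hmod : ∀ x : Int, PySem.Int.mod x 2 = x % 2 := fun x => PySem.Int.mod_eq_emod_of_pos (by norm_num)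
  by_cases hlt : start < end_
  · rcases Int.emod_two_eq_zero_or_one start with he | ho
    · -- start even: B's loop examines start itself
      have hfirst : start + PySem.Int.mod start 2 = start := by rw [hmod]; omega
      have hnext : (start + 1) + PySem.Int.mod (start + 1) 2 = start + 2 := by rw [hmod]; omega
      rw [hfirst, PySem.List.pyRange_one_cons hlt]
      simp only [bncLoopA]
      rw [bncGo, dif_pos ⟨by omega, hlt⟩]
      simp only []
      by_cases hc : (" " ++ PySem.Int.toStr start ++ "." : String) = t
      · rw [if_pos hc, if_neg (not_not_intro hc)]
        have hrec := ih (end_ - (start + 1)).toNat (by omega) (start + 1) rfl acc hacc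
        rw [hnext] at hrec
        exact hrec
      · rw [if_neg hc, if_pos hc]
        have hmz : PySem.Int.mod start 2 = 0 := by rw [hmod]; exact he
        rw [if_pos hmz]
        by_cases hfull : (acc.length : Int) + 1 ≥ keep
        · rw [if_pos hfull]
          rw [pvGoDone t end_ (start + 2) (keep - acc.length - 1) _ (by omega)]
        · rw [if_neg hfull]
          have hl : (((acc ++ [" " ++ PySem.Int.toStr start ++ "."]).length : Int)) = (acc.length : Int) + 1 := by
            simp
          have hrec := ih (end_ - (start + 1)).toNat (by omega) (start + 1) rfl
            (acc ++ [" " ++ PySem.Int.toStr start ++ "."]) (by omega)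
          rw [hnext, hl,
            show keep - ((acc.length : Int) + 1) = keep - acc.length - 1 from by ring] at hrec
          show bncLoopA t keep _ (acc ++ [" " ++ PySem.Int.toStr start ++ "."]) ((acc.length : Int) + 1) = _
          exact hrec
    · -- start odd: A steps past start, B's loop begins at start + 1 anyway
      have hfirst : start + PySem.Int.mod start 2 = start + 1 := by rw [hmod]; omega
      have hnext : (start + 1) + PySem.Int.mod (start + 1) 2 = start + 1 := by rw [hmod]; omega
      have hrec := ih (end_ - (start + 1)).toNat (by omega) (start + 1) rfl acc hacc
      rw [hnext] at hrec
      rw [hfirst, PySem.List.pyRange_one_cons hlt]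
      simp only [bncLoopA]
      by_cases hc : (" " ++ PySem.Int.toStr start ++ "." : String) = t
      · rw [if_pos hc]
        exact hrec
      · rw [if_neg hc]
        have hmz : ¬ PySem.Int.mod start 2 = 0 := by rw [hmod]; omega
        rw [if_neg hmz]
        simp only
        rw [if_neg (not_le.mpr hacc)]
        exact hrec
  · rw [PySem.List.pyRange_one_eq_nil (by omega)]
    rw [pvGoDone t end_ _ _ _ (by have := hmod start; omega)]
    rfl

-- keep ≤ 0, outside D_: both sides return []
lemma pvKeepNonpos (t : String) (keep start end_ : Int) (hk : keep ≤ 0)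
    (hD : ¬ D_build_neighbor_continuations t keep start end_) :
    build_neighbor_continuations t keep start end_ = []
      ∧ build_neighbor_continuations_alt t keep start end_ = [] := by
  have hmod : ∀ x : Int, PySem.Int.mod x 2 = x % 2 := fun x => PySem.Int.mod_eq_emod_of_pos (by norm_num)
  refine ⟨?_, pvGoDone t end_ _ keep [] (by omega)⟩
  unfold build_neighbor_continuations
  unfold D_build_neighbor_continuations at hD
  by_cases hlt : start < end_
  · have hnif : ¬ if " " ++ PySem.Int.toStr start ++ "." = t
        then PySem.Int.mod start 2 = 1 ∧ start + 1 < end_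
        else PySem.Int.mod start 2 = 0 := fun h => hD ⟨hk, hlt, h⟩
    rw [PySem.List.pyRange_one_cons hlt]
    simp only [bncLoopA]
    by_cases hc : (" " ++ PySem.Int.toStr start ++ "." : String) = t
    · rw [if_pos hc]
      rw [if_pos hc] at hnif
      by_cases hend : start + 1 < end_
      · have hodd : ¬ PySem.Int.mod (start + 1) 2 = 0 := by
          have h1 : PySem.Int.mod start 2 ≠ 1 := fun h => hnif ⟨h, hend⟩
          rw [hmod] at *
          omega
        rw [PySem.List.pyRange_one_cons hend]
        simp only [bncLoopA]
        have hc2 : ¬ (" " ++ PySem.Int.toStr (start + 1) ++ "." : String) = t := by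
          rw [← hc]; exact fun h => pvContSuccNe start h.symm
        rw [if_neg hc2, if_neg hodd]
        simp only
        rw [if_pos (by simpa using hk)]
      · rw [PySem.List.pyRange_one_eq_nil (by omega)]
        rfl
    · rw [if_neg hc] at hnif
      rw [if_neg hc, if_neg hnif]
      simp only
      rw [if_pos (by simpa using hk)]
  · rw [PySem.List.pyRange_one_eq_nil (by omega)]
    rfl

lemma pvKeepNonposD (t : String) (keep start end_ : Int) (hk : keep ≤ 0)
    (hD : D_build_neighbor_continuations t keep start end_) :
    build_neighbor_continuations t keep start end_ ≠ []
      ∧ build_neighbor_continuations_alt t keep start end_ = [] := by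
  have hmod : ∀ x : Int, PySem.Int.mod x 2 = x % 2 := fun x => PySem.Int.mod_eq_emod_of_pos (by norm_num)
  refine ⟨?_, pvGoDone t end_ _ keep [] (by omega)⟩
  unfold build_neighbor_continuations
  obtain ⟨-, hlt, hif⟩ := hD
  rw [PySem.List.pyRange_one_cons hlt]
  simp only [bncLoopA]
  by_cases hc : (" " ++ PySem.Int.toStr start ++ "." : String) = t
  · rw [if_pos hc] at hif
    obtain ⟨hodd, hlt2⟩ := hif
    have heven : PySem.Int.mod (start + 1) 2 = 0 := by rw [hmod] at *; omega
    rw [if_pos hc]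
    rw [PySem.List.pyRange_one_cons hlt2]
    simp only [bncLoopA]
    have hc2 : ¬ (" " ++ PySem.Int.toStr (start + 1) ++ "." : String) = t := by
      rw [← hc]; exact fun h => pvContSuccNe start h.symm
    rw [if_neg hc2, if_pos heven]
    simp only
    rw [if_pos (by simpa using by omega : (0:Int) + 1 ≥ keep)]
    simp
  · rw [if_neg hc] at hif
    rw [if_neg hc, if_pos hif]
    simp only
    rw [if_pos (by simpa using by omega : (0:Int) + 1 ≥ keep)]
    simp

-- ===== VERDICT (by name: the statement is the Claim_ definition above) =====
theorem build_neighbor_continuations_spec : Claim_unchanged_build_neighbor_continuations := by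
  intro t keep start end_ _ hD
  by_cases hk : 1 ≤ keep
  · unfold build_neighbor_continuations build_neighbor_continuations_alt
    have := pvMain t keep start end_ [] (by simpa using hk)
    simpa using this
  · have h := pvKeepNonpos t keep start end_ (by omega) hD
    rw [h.1, h.2]

theorem build_neighbor_continuations_changed : Claim_changed_build_neighbor_continuations := by
  unfold Claim_changed_build_neighbor_continuations
  refine ⟨by decide, by decide, by decide, ?_, by decide⟩
  show build_neighbor_continuations_alt "x" 0 2 5 = []
  exact pvGoDone _ _ _ _ _ (by omega)

theorem build_neighbor_continuations_tight : Claim_exact_build_neighbor_continuations := by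
  intro t keep start end_ _ hD
  have hk : keep ≤ 0 := hD.1
  have h := pvKeepNonposD t keep start end_ hk hD
  rw [h.2]
  exact h.1
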